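-- pv_equiv track=rewrite | github.com/feldboy/pdf_agent_project | src/legal_system/legal_case_processor.py | _identify_separate_reports
-- ===== SOURCE A (Python) =====
-- from typing import Dict, List, Optional, Tuple, Any
--
-- def _identify_separate_reports(content: str) -> List[str]:
--     """Identify and separate multiple police reports in content"""
--     # Look for report separators
--     separators = [
--         'POLICE REPORT',
--         'INCIDENT REPORT',
--         'ACCIDENT REPORT',
--         'REPORT NUMBER',
--         'REPORT #'
--     ]
--
--     reports = []
--     lines = content.split('\n')
--     current_report = []
--
--     for line in lines:
--         line_upper = line.upper()
--         if any(sep in line_upper for sep in separators) and current_report: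
--             # Found a new report, save the current one
--             reports.append('\n'.join(current_report))
--             current_report = [line]
--         else:
--             current_report.append(line)
--
--     # Add the last report
--     if current_report:
--         reports.append('\n'.join(current_report))
--
--     # Filter out very short "reports" (likely false positives)
--     reports = [report for report in reports if len(report.split()) > 50]
--
--     return reports if len(reports) > 1 else [content]
-- ===== SOURCE B (Python) =====
-- def _identify_separate_reports(content: str):
--     """Identify and separate multiple police reports in content.
--
--     Alternative decomposition: instead of accumulating lines into a running
--     buffer, repeatedly take one whole report chunk (head line plus all
--     following non-separator lines) off the front of the remaining lines.
--     """
--     separators = [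
--         'POLICE REPORT',
--         'INCIDENT REPORT',
--         'ACCIDENT REPORT',
--         'REPORT NUMBER',
--         'REPORT #'
--     ]
--
--     def is_sep(line):
--         u = line.upper()
--         return any(s in u for s in separators)
--
--     lines = content.split('\n')
--     reports = []
--     rest = lines
--     while rest:
--         head, tail = rest[0], rest[1:]
--         i = 0
--         while i < len(tail) and not is_sep(tail[i]):
--             i += 1
--         reports.append('\n'.join([head] + tail[:i]))
--         rest = tail[i:]
--
--     reports = [r for r in reports if len(r.split()) > 50]
--     return reports if len(reports) > 1 else [content]
-- ===== Notes on version B (the rewrite author's own statement) =====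
-- stated objective: alternative
-- what changed: Replaces A's accumulate-and-flush fold with mutable reports/current_report state by a chunk-at-a-time scan that repeatedly peels one whole report (head line plus following non-separator lines) off the front of the remaining lines.
import Mathlib
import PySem

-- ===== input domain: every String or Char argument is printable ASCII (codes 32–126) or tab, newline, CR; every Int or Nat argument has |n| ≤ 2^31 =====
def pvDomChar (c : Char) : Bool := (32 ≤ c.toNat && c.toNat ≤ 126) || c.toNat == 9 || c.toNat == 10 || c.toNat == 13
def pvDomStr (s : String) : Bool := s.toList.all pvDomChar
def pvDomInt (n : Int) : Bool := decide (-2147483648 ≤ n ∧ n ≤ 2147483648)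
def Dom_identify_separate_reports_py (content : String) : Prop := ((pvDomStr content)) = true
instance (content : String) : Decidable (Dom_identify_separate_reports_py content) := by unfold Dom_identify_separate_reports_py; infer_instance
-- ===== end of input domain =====

-- B re-decomposes A's accumulate-and-flush loop into a chunk-at-a-time scan
-- (take the head line plus all following non-separator lines, repeat); same cost, clearer structure.


-- ===== PORT A =====
def pvSepsA : List String :=
  ["POLICE REPORT", "INCIDENT REPORT", "ACCIDENT REPORT", "REPORT NUMBER", "REPORT #"]

-- any(sep in line.upper() for sep in separators)
def pvIsSepA (line : String) : Bool :=
  pvSepsA.any (fun sep => PySem.Str.isIn sep (PySem.Str.upper line))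

def identify_separate_reports_py (content : String) : List String :=
  -- lines = content.split('\n')  (separator is nonempty, so Chars.splitOn is exact)
  let lines : List String := (PySem.Chars.splitOn content.toList "\n".toList).map String.ofList
  -- the for-loop over lines with state (reports, current_report)
  let st := lines.foldl
    (fun (st : List String × List String) line =>
      if pvIsSepA line && !st.2.isEmpty then
        (st.1 ++ [PySem.Str.join "\n" st.2], [line])
      else
        (st.1, st.2 ++ [line]))
    ([], [])
  -- if current_report: reports.append('\n'.join(current_report))
  let reports := if st.2.isEmpty then st.1 else st.1 ++ [PySem.Str.join "\n" st.2]
  -- reports = [r for r in reports if len(r.split()) > 50]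
  let reports := reports.filter (fun r => 50 < (PySem.Str.split₀ r).length)
  if 1 < reports.length then reports else [content]

-- ===== PORT B =====
def pvSepsB : List String :=
  ["POLICE REPORT", "INCIDENT REPORT", "ACCIDENT REPORT", "REPORT NUMBER", "REPORT #"]

def pvIsSepB (line : String) : Bool :=
  pvSepsB.any (fun sep => PySem.Str.isIn sep (PySem.Str.upper line))

-- the outer while-loop of Source B: peel one chunk (head + following non-separator lines) per step;
-- the inner index loop computing i is exactly takeWhile/dropWhile on the tail
def pvChunksB : List String → List String
  | [] => []
  | head :: tail =>
    PySem.Str.join "\n" (head :: tail.takeWhile (fun l => !pvIsSepB l)) ::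
      pvChunksB (tail.dropWhile (fun l => !pvIsSepB l))
termination_by l => l.length
decreasing_by
  simp only [List.length_cons]
  exact Nat.lt_succ_of_le (tail.length_dropWhile_le _)

def identify_separate_reports_py_alt (content : String) : List String :=
  let lines : List String := (PySem.Chars.splitOn content.toList "\n".toList).map String.ofList
  let reports := pvChunksB lines
  let reports := reports.filter (fun r => 50 < (PySem.Str.split₀ r).length)
  if 1 < reports.length then reports else [content]

-- ===== PRECONDITION & SPEC =====
def Spec_identify_separate_reports_py (content : String) (out : List String) : Prop := out = identify_separate_reports_py_alt content
instance (content : String) (out : List String) : Decidable (Spec_identify_separate_reports_py content out) := by unfold Spec_identify_separate_reports_py; infer_instance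

-- ===== CLAIM (what is proved, stated in full; the proofs are below) =====
def Claim_equal_identify_separate_reports_py : Prop := ∀ (content : String), Dom_identify_separate_reports_py content → Spec_identify_separate_reports_py content (identify_separate_reports_py content)

-- ===== LEMMAS AND PROOFS =====

-- proof-only helper: the list of line-chunks A's loop produces, starting from a nonempty buffer
def pvChunksAux (cur : List String) : List String → List (List String)
  | [] => [cur]
  | x :: xs => if pvIsSepA x then cur :: pvChunksAux [x] xs else pvChunksAux (cur ++ [x]) xs

theorem pvIsSepB_eq (l : String) : pvIsSepB l = pvIsSepA l := rfl

-- A's fold (then final flush) = reports ++ joined chunks, for nonempty current buffer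
theorem pvFoldA_eq (rest : List String) : ∀ (reports cur : List String), cur ≠ [] →
    (let st := rest.foldl
        (fun (st : List String × List String) line =>
          if pvIsSepA line && !st.2.isEmpty then
            (st.1 ++ [PySem.Str.join "\n" st.2], [line])
          else
            (st.1, st.2 ++ [line]))
        (reports, cur)
     if st.2.isEmpty then st.1 else st.1 ++ [PySem.Str.join "\n" st.2])
    = reports ++ (pvChunksAux cur rest).map (PySem.Str.join "\n") := by
  induction rest with
  | nil =>
    intro reports cur hcur
    simp [pvChunksAux, List.isEmpty_iff, hcur]
  | cons x xs ih =>
    intro reports cur hcur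
    simp only [List.foldl_cons, pvChunksAux]
    by_cases hs : pvIsSepA x
    · have : (pvIsSepA x && !cur.isEmpty) = true := by
        simp [hs, hcur]
      rw [this]
      simp only [if_pos]
      rw [ih _ [x] (by simp)]
      simp [hs]
    · have : (pvIsSepA x && !cur.isEmpty) = false := by simp [hs]
      rw [this]
      simp only [Bool.false_eq_true, if_false]
      rw [ih reports (cur ++ [x]) (by simp)]
      simp [hs]

-- A's chunks, joined, are exactly B's chunk scan
theorem pvChunksAux_eq (rest : List String) : ∀ (cur : List String),
    (pvChunksAux cur rest).map (PySem.Str.join "\n")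
      = PySem.Str.join "\n" (cur ++ rest.takeWhile (fun l => !pvIsSepA l))
          :: pvChunksB (rest.dropWhile (fun l => !pvIsSepA l)) := by
  induction rest with
  | nil => intro cur; simp [pvChunksAux, pvChunksB]
  | cons x xs ih =>
    intro cur
    by_cases hs : pvIsSepA x
    · simp only [pvChunksAux, if_pos hs, List.map_cons, ih]
      rw [List.takeWhile_cons_of_neg (by simp [hs]), List.dropWhile_cons_of_neg (by simp [hs])]
      rw [pvChunksB]
      simp [pvIsSepB_eq]
    · simp only [pvChunksAux, if_neg hs, ih]
      rw [List.takeWhile_cons_of_pos (by simp [hs]), List.dropWhile_cons_of_pos (by simp [hs])]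
      simp

theorem pvSplitOn_go_ne_nil (sep : List Char) :
    ∀ fuel l cur acc, PySem.Chars.splitOn.go sep fuel l cur acc ≠ [] := by
  intro fuel
  induction fuel with
  | zero => intro l cur acc; simp [PySem.Chars.splitOn.go]
  | succ n ih =>
    intro l cur acc
    cases l with
    | nil => simp [PySem.Chars.splitOn.go]
    | cons c rest =>
      simp only [PySem.Chars.splitOn.go]
      split <;> apply ih

-- ===== VERDICT (by name: the statement is the Claim_ definition above) =====
theorem identify_separate_reports_py_spec : Claim_equal_identify_separate_reports_py := by
  intro content _
  unfold Spec_identify_separate_reports_py identify_separate_reports_py identify_separate_reports_py_alt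
  have hne : (PySem.Chars.splitOn content.toList "\n".toList).map String.ofList ≠ [] := by
    intro h
    exact pvSplitOn_go_ne_nil _ _ _ _ _ (List.map_eq_nil_iff.mp h)
  obtain ⟨h, t, hlines⟩ := List.exists_cons_of_ne_nil hne
  simp only [hlines]
  -- first iteration of A's loop: empty buffer, so the else-branch fires
  have hfirst : ((fun (st : List String × List String) line =>
      if pvIsSepA line && !st.2.isEmpty then
        (st.1 ++ [PySem.Str.join "\n" st.2], [line])
      else
        (st.1, st.2 ++ [line])) ([], []) h) = (([] : List String), [h]) := by
    simp
  simp only [List.foldl_cons, hfirst]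
  rw [pvFoldA_eq t [] [h] (by simp)]
  rw [pvChunksAux_eq t [h]]
  rw [pvChunksB]
  simp [pvIsSepB_eq]
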